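-- pv_equiv track=rewrite | github.com/hui52283476-collab/Retail | mail.py | match_specification
-- ===== SOURCE A (Python) =====
-- SPEC_CHECKLIST = [
--     "Instant audio recording", "Upload audio", "Upload transcript", "Drag-and-drop",
--     "ASR transcription", "LLM point-form summary", "Match summary to specification",
--     "Display coverage score", "Auto-generated follow-up email", "Progress indicator",
--     "Error messages", "Temporary storage"
-- ]
--
-- def match_specification(summary):
--     summary_lower = summary.lower()
--     covered = []
--     for item in SPEC_CHECKLIST:
--         keywords = item.lower().split()[:2]  # 更寬鬆
--         if any(kw in summary_lower for kw in keywords):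
--             covered.append(item)
--     score = len(covered)
--     return covered, [i for i in SPEC_CHECKLIST if i not in covered], score, len(SPEC_CHECKLIST)
-- ===== SOURCE B (Python) =====
-- SPEC_CHECKLIST = [
--     "Instant audio recording", "Upload audio", "Upload transcript", "Drag-and-drop",
--     "ASR transcription", "LLM point-form summary", "Match summary to specification",
--     "Display coverage score", "Auto-generated follow-up email", "Progress indicator",
--     "Error messages", "Temporary storage"
-- ]
--
-- # The checklist is a module constant, so its lowered first-two keywords are a fixed table:
-- # precompute it once and partition the checklist in a single pass instead of building
-- # `covered` and then re-scanning the checklist with `i not in covered`.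
-- _KEYWORD_TABLE = [
--     ("Instant audio recording", ["instant", "audio"]),
--     ("Upload audio", ["upload", "audio"]),
--     ("Upload transcript", ["upload", "transcript"]),
--     ("Drag-and-drop", ["drag-and-drop"]),
--     ("ASR transcription", ["asr", "transcription"]),
--     ("LLM point-form summary", ["llm", "point-form"]),
--     ("Match summary to specification", ["match", "summary"]),
--     ("Display coverage score", ["display", "coverage"]),
--     ("Auto-generated follow-up email", ["auto-generated", "follow-up"]),
--     ("Progress indicator", ["progress", "indicator"]),
--     ("Error messages", ["error", "messages"]),
--     ("Temporary storage", ["temporary", "storage"]),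
-- ]
--
-- def match_specification(summary):
--     s = summary.lower()
--     covered, uncovered = [], []
--     for item, keywords in _KEYWORD_TABLE:
--         (covered if any(kw in s for kw in keywords) else uncovered).append(item)
--     return covered, uncovered, len(covered), len(SPEC_CHECKLIST)
-- ===== Notes on version B (the rewrite author's own statement) =====
-- stated objective: simpler
-- what changed: B precomputes the checklist's lowered first-two-keyword table as a module constant and partitions the checklist into covered/uncovered lists in a single pass, replacing A's per-call lowering+splitting of each item and A's second pass that re-scans the covered list for every checklist item.
import Mathlib
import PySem

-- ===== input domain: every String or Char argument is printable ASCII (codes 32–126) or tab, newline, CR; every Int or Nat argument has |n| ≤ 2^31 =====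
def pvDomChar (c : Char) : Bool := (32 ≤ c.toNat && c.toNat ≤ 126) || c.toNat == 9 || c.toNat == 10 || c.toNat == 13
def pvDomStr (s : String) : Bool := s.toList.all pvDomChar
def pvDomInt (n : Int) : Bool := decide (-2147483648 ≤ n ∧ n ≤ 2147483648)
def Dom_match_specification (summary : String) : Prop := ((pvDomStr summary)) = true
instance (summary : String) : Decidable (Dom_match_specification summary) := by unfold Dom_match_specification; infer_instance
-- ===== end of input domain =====

-- B replaces A's two passes (build `covered`, then re-scan the checklist with `i not in covered`)
-- by a precomputed keyword table and ONE partitioning pass; objective: simpler (same cost class).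

-- ===== PORT A =====
def specChecklist : List String := [
  "Instant audio recording", "Upload audio", "Upload transcript", "Drag-and-drop",
  "ASR transcription", "LLM point-form summary", "Match summary to specification",
  "Display coverage score", "Auto-generated follow-up email", "Progress indicator",
  "Error messages", "Temporary storage"]

def match_specification (summary : String) : List String × List String × Int × Int :=
  let summaryLower := PySem.Str.lower summary
  let covered := specChecklist.foldl (fun covered item =>
    let keywords := PySem.List.slice (PySem.Str.split₀ (PySem.Str.lower item)) none (some 2)
    if keywords.any (fun kw => PySem.Str.isIn kw summaryLower) then covered ++ [item]
    else covered) []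
  (covered, specChecklist.filter (fun i => !covered.contains i),
   (covered.length : Int), (specChecklist.length : Int))

-- ===== PORT B =====
def keywordTable : List (String × List String) := [
  ("Instant audio recording", ["instant", "audio"]),
  ("Upload audio", ["upload", "audio"]),
  ("Upload transcript", ["upload", "transcript"]),
  ("Drag-and-drop", ["drag-and-drop"]),
  ("ASR transcription", ["asr", "transcription"]),
  ("LLM point-form summary", ["llm", "point-form"]),
  ("Match summary to specification", ["match", "summary"]),
  ("Display coverage score", ["display", "coverage"]),
  ("Auto-generated follow-up email", ["auto-generated", "follow-up"]),
  ("Progress indicator", ["progress", "indicator"]),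
  ("Error messages", ["error", "messages"]),
  ("Temporary storage", ["temporary", "storage"])]

def match_specification_alt (summary : String) : List String × List String × Int × Int :=
  let s := PySem.Str.lower summary
  let r := keywordTable.foldl (fun (acc : List String × List String) p =>
    if p.2.any (fun kw => PySem.Str.isIn kw s) then (acc.1 ++ [p.1], acc.2)
    else (acc.1, acc.2 ++ [p.1])) ([], [])
  (r.1, r.2, (r.1.length : Int), 12)

-- ===== PRECONDITION & SPEC =====
def Spec_match_specification (summary : String) (out : List String × List String × Int × Int) : Prop := out = match_specification_alt summary
instance (summary : String) (out : List String × List String × Int × Int) : Decidable (Spec_match_specification summary out) := by unfold Spec_match_specification; infer_instance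

-- ===== CLAIM (what is proved, stated in full; the proofs are below) =====
def Claim_equal_match_specification : Prop := ∀ (summary : String), Dom_match_specification summary → Spec_match_specification summary (match_specification summary)

-- ===== LEMMAS AND PROOFS =====

-- B's single partitioning fold, characterised as two filters.
theorem partition_foldl {α β : Type} (c : α × β → Bool) :
    ∀ (l : List (α × β)) (acc : List α × List α),
      l.foldl (fun (acc : List α × List α) p =>
        if c p then (acc.1 ++ [p.1], acc.2) else (acc.1, acc.2 ++ [p.1])) acc =
      (acc.1 ++ ((l.filter c).map Prod.fst), acc.2 ++ ((l.filter (fun p => !c p)).map Prod.fst)) := by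
  intro l
  induction l with
  | nil => intro acc; simp
  | cons p t ih =>
    intro acc
    by_cases h : c p = true <;> simp [List.foldl_cons, h, ih]

-- The precomputed keyword table IS the checklist paired with its lowered first-two words.
theorem keywordTable_eq :
    keywordTable = specChecklist.map (fun item =>
      (item, PySem.List.slice (PySem.Str.split₀ (PySem.Str.lower item)) none (some 2))) := by
  decide

theorem match_specification_spec' (summary : String) :
    match_specification summary = match_specification_alt summary := by
  unfold match_specification match_specification_alt
  simp only [keywordTable_eq, partition_foldl, PySem.List.foldl_append_if,
    List.nil_append, List.filter_map, List.map_map, Function.comp_def, List.map_id']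
  refine congrArg₂ _ rfl (congrArg₂ _ ?_ rfl)
  apply List.filter_congr
  intro i hi
  simp [List.any_eq, List.mem_filter, hi]

-- ===== VERDICT (by name: the statement is the Claim_ definition above) =====
theorem match_specification_spec : Claim_equal_match_specification := by
  intro summary _
  exact match_specification_spec' summary
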